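-- pv_equiv track=rewrite | github.com/lucasvtiradentes/md-align | src/docalign/checks/tables.py | split_table_row
-- ===== SOURCE A (Python) =====
-- def split_table_row(raw):
--     cells = []
--     current = ""
--     in_backtick = False
--     i = 0
--     while i < len(raw):
--         ch = raw[i]
--         if ch == "`":
--             in_backtick = not in_backtick
--             current += ch
--         elif ch == "|" and not in_backtick:
--             cells.append(current)
--             current = ""
--         else:
--             current += ch
--         i += 1
--     cells.append(current)
--     return cells
-- ===== SOURCE B (Python) =====
-- def split_table_row(raw):
--     cells = []
--     current = ""
--     for idx, seg in enumerate(raw.split("`")):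
--         if idx > 0:
--             current += "`"
--         if idx % 2 == 0:
--             parts = seg.split("|")
--             for part in parts[:-1]:
--                 cells.append(current + part)
--                 current = ""
--             current += parts[-1]
--         else:
--             current += seg
--     cells.append(current)
--     return cells
-- ===== Notes on version B (the rewrite author's own statement) =====
-- stated objective: faster
-- what changed: Instead of a char-by-char scan with an in-backtick flag and per-character string concatenation, B splits the row once on backticks; even-indexed segments (outside code spans) are split on pipe characters to flush cells, odd-indexed segments are appended verbatim, with backtick delimiters reinserted between segments.
import Mathlib
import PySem

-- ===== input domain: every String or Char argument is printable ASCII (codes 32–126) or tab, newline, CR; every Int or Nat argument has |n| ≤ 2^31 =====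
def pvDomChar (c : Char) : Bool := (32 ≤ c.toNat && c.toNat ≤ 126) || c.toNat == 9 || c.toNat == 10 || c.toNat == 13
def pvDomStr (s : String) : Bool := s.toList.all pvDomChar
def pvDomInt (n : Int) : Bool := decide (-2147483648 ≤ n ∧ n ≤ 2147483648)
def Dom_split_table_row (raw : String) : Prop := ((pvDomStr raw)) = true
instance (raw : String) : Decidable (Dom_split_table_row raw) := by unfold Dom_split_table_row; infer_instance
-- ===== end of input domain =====

-- B replaces A's char-by-char scan (with an in-backtick flag) by one split on backticks:
-- even-indexed segments (outside code spans) are split on pipes, odd ones kept verbatim. Objective: faster (measured).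

-- ===== PORT A =====
-- A's while loop over raw with state (cells, current, in_backtick); strings kept as List Char, wrapped at the end.
def splitRowA : List Char → List (List Char) → List Char → Bool → List (List Char)
  | [], cells, current, _ => cells ++ [current]
  | ch :: rest, cells, current, inB =>
    if ch = '`' then splitRowA rest cells (current ++ [ch]) (!inB)
    else if ch = '|' ∧ inB = false then splitRowA rest (cells ++ [current]) [] inB
    else splitRowA rest cells (current ++ [ch]) inB

def split_table_row (raw : String) : List String :=
  (splitRowA raw.toList [] [] false).map (fun cs => String.mk cs)

-- ===== PORT B =====
-- Source B's inner loop: for part in parts[:-1]: cells.append(current + part); current = "" — then current += parts[-1]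
def flushCells : List (List Char) → List (List Char) → List Char → (List (List Char)) × List Char
  | [], cells, current => (cells, current)
  | [last], cells, current => (cells, current ++ last)
  | part :: rest, cells, current => flushCells rest (cells ++ [current ++ part]) []

-- Source B's outer loop over enumerate(raw.split("`"))
def segLoop : List (Int × List Char) → List (List Char) → List Char → List (List Char)
  | [], cells, current => cells ++ [current]
  | (idx, seg) :: rest, cells, current =>
    let current := if idx > 0 then current ++ ['`'] else current
    if idx % 2 = 0 then
      let p := flushCells (seg.splitOn '|') cells current
      segLoop rest p.1 p.2
    else
      segLoop rest cells (current ++ seg)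

def split_table_row_alt (raw : String) : List String :=
  (segLoop (PySem.List.enumerate (raw.toList.splitOn '`')) [] []).map (fun cs => String.mk cs)

-- ===== PRECONDITION & SPEC =====
def Spec_split_table_row (raw : String) (out : List String) : Prop := out = split_table_row_alt raw
instance (raw : String) (out : List String) : Decidable (Spec_split_table_row raw out) := by unfold Spec_split_table_row; infer_instance

-- ===== CLAIM (what is proved, stated in full; the proofs are below) =====
def Claim_equal_split_table_row : Prop := ∀ (raw : String), Dom_split_table_row raw → Spec_split_table_row raw (split_table_row raw)

-- ===== LEMMAS AND PROOFS =====

-- proof-side views of B's remaining work once at least one segment has been consumed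
-- (every later segment is preceded by a reinserted backtick); procOut expects an outside segment next.
mutual
def procOut : List (List Char) → List (List Char) → List Char → List (List Char)
  | [], cells, current => cells ++ [current]
  | seg :: rest, cells, current =>
    procIn rest (flushCells (seg.splitOn '|') cells (current ++ ['`'])).1
                (flushCells (seg.splitOn '|') cells (current ++ ['`'])).2
def procIn : List (List Char) → List (List Char) → List Char → List (List Char)
  | [], cells, current => cells ++ [current]
  | seg :: rest, cells, current => procOut rest cells (current ++ ['`'] ++ seg)
end

theorem segLoop_enumerate (segs : List (List Char)) :
    ∀ (n : Int) (cells : List (List Char)) (current : List Char), 0 < n →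
      segLoop (PySem.List.enumerate segs n) cells current =
        if n % 2 = 0 then procOut segs cells current else procIn segs cells current := by
  induction segs with
  | nil => intro n cells current hn; simp [PySem.List.enumerate, segLoop, procOut, procIn]
  | cons seg rest ih =>
    intro n cells current hn
    rw [PySem.List.enumerate_cons]
    by_cases h : n % 2 = 0
    · have h1 : ¬ (n + 1) % 2 = 0 := by omega
      simp only [segLoop, if_pos hn, if_pos h, procOut]
      rw [ih (n+1) _ _ (by omega), if_neg h1]
    · have h1 : (n + 1) % 2 = 0 := by omega
      simp only [segLoop, if_pos hn, if_neg h, procIn]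
      rw [ih (n+1) _ _ (by omega), if_pos h1, List.append_assoc]

theorem flushCells_modifyHead (parts : List (List Char)) (c : Char)
    (cells : List (List Char)) (current : List Char) (h : parts ≠ []) :
    flushCells (List.modifyHead (List.cons c) parts) cells current
      = flushCells parts cells (current ++ [c]) := by
  match parts with
  | [] => exact absurd rfl h
  | [last] => simp only [List.modifyHead, flushCells]; rw [List.append_cons]
  | p :: q :: r =>
    simp only [List.modifyHead, flushCells]
    rw [List.append_cons]
    simp

theorem flushCells_pipe (cs : List Char) (cells : List (List Char)) (current : List Char) :
    flushCells (('|' :: cs).splitOn '|') cells current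
      = flushCells (cs.splitOn '|') (cells ++ [current]) [] := by
  simp only [List.splitOn, List.splitOnP_cons, beq_self_eq_true, if_pos]
  obtain ⟨p, r, hpr⟩ := List.exists_cons_of_ne_nil (List.splitOnP_ne_nil (· == '|') cs)
  rw [hpr]
  match r with
  | [] => simp [flushCells]
  | q :: r' => simp [flushCells]

theorem flushCells_other (c : Char) (cs : List Char) (hc : c ≠ '|')
    (cells : List (List Char)) (current : List Char) :
    flushCells ((c :: cs).splitOn '|') cells current
      = flushCells (cs.splitOn '|') cells (current ++ [c]) := by
  simp only [List.splitOn, List.splitOnP_cons, beq_iff_eq, if_neg hc]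
  exact flushCells_modifyHead _ _ _ _ (List.splitOnP_ne_nil _ _)

theorem stepBt (rest : List Char) (cells : List (List Char)) (cur : List Char) (inB : Bool) :
    splitRowA ('`' :: rest) cells cur inB = splitRowA rest cells (cur ++ ['`']) (!inB) := by
  simp [splitRowA]

theorem stepPipeOut (rest : List Char) (cells : List (List Char)) (cur : List Char) :
    splitRowA ('|' :: rest) cells cur false = splitRowA rest (cells ++ [cur]) [] false := by
  simp [splitRowA]

theorem stepOtherOut (ch : Char) (rest : List Char) (cells : List (List Char)) (cur : List Char)
    (h : ch ≠ '`') (hp : ch ≠ '|') :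
    splitRowA (ch :: rest) cells cur false = splitRowA rest cells (cur ++ [ch]) false := by
  simp [splitRowA, h, hp]

theorem stepIn (ch : Char) (rest : List Char) (cells : List (List Char)) (cur : List Char)
    (h : ch ≠ '`') :
    splitRowA (ch :: rest) cells cur true = splitRowA rest cells (cur ++ [ch]) true := by
  simp [splitRowA, h]

theorem splitOn_bt_cons (tl : List Char) :
    ('`' :: tl).splitOn '`' = [] :: tl.splitOn '`' := by
  simp only [List.splitOn, List.splitOnP_cons]; simp

theorem splitOn_other_cons (ch : Char) (tl : List Char) (h : ch ≠ '`') :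
    (ch :: tl).splitOn '`' = List.modifyHead (List.cons ch) (tl.splitOn '`') := by
  simp only [List.splitOn, List.splitOnP_cons]; simp [h]

theorem splitRowA_split (cs : List Char) :
    (∀ s0 rest cells current, cs.splitOn '`' = s0 :: rest →
        splitRowA cs cells current false
          = procIn rest (flushCells (s0.splitOn '|') cells current).1
                        (flushCells (s0.splitOn '|') cells current).2) ∧
    (∀ s0 rest cells current, cs.splitOn '`' = s0 :: rest →
        splitRowA cs cells current true = procOut rest cells (current ++ s0)) := by
  induction cs with
  | nil =>
    constructor <;> intro s0 rest cells current h <;>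
      rw [List.splitOn, List.splitOnP_nil] at h <;>
      injection h with h2 h3 <;> subst h2 <;> subst h3 <;>
      simp [splitRowA, flushCells, procIn, procOut, List.splitOn, List.splitOnP_nil]
  | cons ch tl ih =>
    obtain ⟨s1, r1, h1'⟩ := List.exists_cons_of_ne_nil (List.splitOnP_ne_nil (· == '`') tl)
    have h1' : tl.splitOn '`' = s1 :: r1 := h1'
    constructor
    · intro s0 rest cells current h
      by_cases hbt : ch = '`'
      · subst hbt
        rw [splitOn_bt_cons, h1'] at h
        injection h with h2 h3; subst h2; subst h3
        rw [stepBt, Bool.not_false, (ih.2) s1 r1 cells (current ++ ['`']) h1']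
        simp only [List.splitOn, List.splitOnP_nil, flushCells, procIn, List.append_nil,
          List.append_assoc]
      · rw [splitOn_other_cons ch tl hbt, h1'] at h
        simp only [List.modifyHead] at h
        injection h with h2 h3; subst h2; subst h3
        by_cases hp : ch = '|'
        · subst hp
          rw [stepPipeOut, (ih.1) s1 r1 (cells ++ [current]) [] h1', flushCells_pipe]
        · rw [stepOtherOut ch tl cells current hbt hp,
              (ih.1) s1 r1 cells (current ++ [ch]) h1', flushCells_other ch s1 hp]
    · intro s0 rest cells current h
      by_cases hbt : ch = '`'
      · subst hbt
        rw [splitOn_bt_cons, h1'] at h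
        injection h with h2 h3; subst h2; subst h3
        rw [stepBt, Bool.not_true, (ih.1) s1 r1 cells (current ++ ['`']) h1']
        simp only [procOut, List.splitOn, List.append_nil]
      · rw [splitOn_other_cons ch tl hbt, h1'] at h
        simp only [List.modifyHead] at h
        injection h with h2 h3; subst h2; subst h3
        rw [stepIn ch tl cells current hbt, (ih.2) s1 r1 cells (current ++ [ch]) h1']
        simp only [List.append_assoc, List.singleton_append]

-- ===== VERDICT (by name: the statement is the Claim_ definition above) =====
theorem split_table_row_spec : Claim_equal_split_table_row := by
  intro raw _
  unfold Spec_split_table_row split_table_row split_table_row_alt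
  congr 1
  obtain ⟨s0, rest, h⟩ :=
    List.exists_cons_of_ne_nil (List.splitOnP_ne_nil (· == '`') raw.toList)
  have h : raw.toList.splitOn '`' = s0 :: rest := h
  rw [h, PySem.List.enumerate_cons]
  simp only [segLoop]
  norm_num
  rw [segLoop_enumerate rest 1 _ _ (by omega)]
  norm_num
  exact (splitRowA_split raw.toList).1 s0 rest [] [] h
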